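-- pv_equiv track=rewrite | github.com/Andrey-Figueroa/Python-2024 | Laboratorio 5.py | intercambiar
-- ===== SOURCE A (Python) =====
-- def contarDigitos(pNumero):
--     contador = 0
--     pNumero = abs(pNumero)
--     while pNumero != 0:
--         pNumero = pNumero//10
--         contador +=1
--     return contador
--
-- def intercambiar(pNum1, pNum2):
--     if (pNum1 < 0 or pNum2 < 0) or (contarDigitos(pNum1) != contarDigitos(pNum2)):
--         return 0
--     posicion = 0
--     resultado = 0
--     while(pNum1 != 0):
--         digitoPNum1 = pNum1 % 10
--         digitoPNum2 = pNum2 % 10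
--         if(digitoPNum1 > digitoPNum2):
--             resultado = resultado + (digitoPNum2 * 10 ** posicion)
--         else:
--             resultado = resultado + (digitoPNum1 * 10 ** posicion)
--         posicion += 1
--         pNum1 = pNum1 // 10
--         pNum2 = pNum2 // 10
--     return resultado
-- ===== SOURCE B (Python) =====
-- def intercambiar(pNum1, pNum2):
--     if pNum1 < 0 or pNum2 < 0:
--         return 0
--
--     def minNum(a, b):
--         # min-digit number of a and b in Horner form, or None if digit counts differ
--         if a == 0 or b == 0:
--             return 0 if a == b else None
--         rest = minNum(a // 10, b // 10)
--         return None if rest is None else min(a % 10, b % 10) + 10 * rest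
--
--     r = minNum(pNum1, pNum2)
--     return 0 if r is None else r
-- ===== Notes on version B (the rewrite author's own statement) =====
-- stated objective: simpler
-- what changed: Replaces A's separate digit-count pre-pass plus iterative loop with a 10**posicion positional accumulator by one recursive pass that detects the digit-count mismatch inline (None) and builds the result in Horner form (min digit + 10 * rest).
import Mathlib
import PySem

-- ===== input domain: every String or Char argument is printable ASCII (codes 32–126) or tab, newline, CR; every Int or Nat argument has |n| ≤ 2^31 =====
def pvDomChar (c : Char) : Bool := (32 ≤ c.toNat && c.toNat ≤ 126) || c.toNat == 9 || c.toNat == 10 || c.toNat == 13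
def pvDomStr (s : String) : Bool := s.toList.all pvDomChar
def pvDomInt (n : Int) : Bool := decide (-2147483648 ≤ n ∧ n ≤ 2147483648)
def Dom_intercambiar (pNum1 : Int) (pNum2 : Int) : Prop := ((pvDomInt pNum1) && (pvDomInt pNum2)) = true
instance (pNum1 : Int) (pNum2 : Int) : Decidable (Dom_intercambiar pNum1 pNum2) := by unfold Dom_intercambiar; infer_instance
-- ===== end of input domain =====

-- B replaces A's digit-count pre-pass plus positional 10**posicion accumulator loop
-- by one recursive pass detecting the digit-count mismatch inline (None) and building
-- the result in Horner form; objective: simpler.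


-- ===== PORT A =====
-- 'while pNumero != 0: pNumero //= 10; contador += 1' on abs(pNumero): recursion on Nat
-- (exact, since the loop runs on |pNumero| and Python's // agrees with Nat division there)
def cdGo (n : Nat) : Int :=
  if h : n = 0 then 0 else cdGo (n / 10) + 1
termination_by n
decreasing_by exact Nat.div_lt_self (Nat.pos_of_ne_zero h) (by omega)

def contarDigitos (pNumero : Int) : Int := cdGo pNumero.natAbs

-- A's main while loop; it is reached only with pNum1, pNum2 ≥ 0 (the guard), where
-- Python's % and // on these values agree with Nat % and /, so the Nat recursion is exact.
def loopA (n1 n2 : Nat) (pos : Nat) (res : Int) : Int :=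
  if h : n1 = 0 then res
  else
    let d1 : Nat := n1 % 10
    let d2 : Nat := n2 % 10
    let res' : Int := if d1 > d2 then res + (d2 : Int) * 10 ^ pos else res + (d1 : Int) * 10 ^ pos
    loopA (n1 / 10) (n2 / 10) (pos + 1) res'
termination_by n1
decreasing_by exact Nat.div_lt_self (Nat.pos_of_ne_zero h) (by omega)

def intercambiar (pNum1 : Int) (pNum2 : Int) : Int :=
  if (pNum1 < 0 ∨ pNum2 < 0) ∨ contarDigitos pNum1 ≠ contarDigitos pNum2 then 0
  else loopA pNum1.toNat pNum2.toNat 0 0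

-- ===== PORT B =====
-- Source B's minNum; called only with pNum1, pNum2 ≥ 0 (the guard), where Python's % and //
-- agree with Nat % and /, so the Nat recursion is exact.
def minNum (a b : Nat) : Option Nat :=
  if h : a = 0 ∨ b = 0 then (if a = b then some 0 else none)
  else
    match minNum (a / 10) (b / 10) with
    | none => none
    | some rest => some (min (a % 10) (b % 10) + 10 * rest)
termination_by a
decreasing_by exact Nat.div_lt_self (Nat.pos_of_ne_zero (by omega)) (by omega)

def intercambiar_alt (pNum1 : Int) (pNum2 : Int) : Int :=
  if pNum1 < 0 ∨ pNum2 < 0 then 0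
  else
    match minNum pNum1.toNat pNum2.toNat with
    | none => 0
    | some r => (r : Int)

-- ===== PRECONDITION & SPEC =====
def Spec_intercambiar (pNum1 : Int) (pNum2 : Int) (out : Int) : Prop := out = intercambiar_alt pNum1 pNum2
instance (pNum1 : Int) (pNum2 : Int) (out : Int) : Decidable (Spec_intercambiar pNum1 pNum2 out) := by unfold Spec_intercambiar; infer_instance

-- ===== CLAIM (what is proved, stated in full; the proofs are below) =====
def Claim_equal_intercambiar : Prop := ∀ (pNum1 : Int) (pNum2 : Int), Dom_intercambiar pNum1 pNum2 → Spec_intercambiar pNum1 pNum2 (intercambiar pNum1 pNum2)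

-- ===== LEMMAS AND PROOFS =====

theorem cdGo_zero : cdGo 0 = 0 := by unfold cdGo; simp

theorem cdGo_nonneg (n : Nat) : 0 ≤ cdGo n := by
  unfold cdGo
  split
  · simp
  · have := cdGo_nonneg (n / 10)
    omega
termination_by n
decreasing_by exact Nat.div_lt_self (Nat.pos_of_ne_zero (by assumption)) (by omega)

theorem cdGo_pos (n : Nat) (h : n ≠ 0) : 1 ≤ cdGo n := by
  unfold cdGo
  rw [dif_neg h]
  have := cdGo_nonneg (n / 10)
  omega

-- digit counts agree exactly when minNum returns a value
theorem minNum_isSome_iff (a b : Nat) : (minNum a b).isSome = true ↔ cdGo a = cdGo b := by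
  unfold minNum
  by_cases h : a = 0 ∨ b = 0
  · rw [dif_pos h]
    rcases h with h | h
    · subst h
      by_cases hb : (0 : Nat) = b
      · subst hb; simp
      · rw [if_neg hb]
        have := cdGo_pos b (by omega)
        rw [cdGo_zero]
        simp
        omega
    · subst h
      by_cases ha : a = (0 : Nat)
      · subst ha; simp
      · rw [if_neg (by omega)]
        have := cdGo_pos a ha
        rw [cdGo_zero]
        simp
        omega
  · rw [dif_neg h]
    have ha : a ≠ 0 := fun e => h (Or.inl e)
    have hb : b ≠ 0 := fun e => h (Or.inr e)
    have ih := minNum_isSome_iff (a / 10) (b / 10)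
    have ea : cdGo a = cdGo (a / 10) + 1 := by rw [cdGo, dif_neg ha]
    have eb : cdGo b = cdGo (b / 10) + 1 := by rw [cdGo, dif_neg hb]
    have hmatch : (match minNum (a / 10) (b / 10) with
        | none => (none : Option Nat)
        | some rest => some (min (a % 10) (b % 10) + 10 * rest)).isSome
        = (minNum (a / 10) (b / 10)).isSome := by
      cases minNum (a / 10) (b / 10) <;> rfl
    rw [hmatch, ih, ea, eb]
    omega
termination_by a
decreasing_by exact Nat.div_lt_self (Nat.pos_of_ne_zero (by omega)) (by omega)

-- the loop accumulates exactly the Horner value minNum computes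
theorem loopA_minNum (a b : Nat) (r : Nat) (hm : minNum a b = some r) :
    ∀ (pos : Nat) (res : Int), loopA a b pos res = res + (r : Int) * 10 ^ pos := by
  intro pos res
  by_cases ha : a = 0
  · subst ha
    unfold minNum at hm
    rw [dif_pos (Or.inl rfl)] at hm
    by_cases hb : (0 : Nat) = b
    · rw [if_pos hb] at hm
      have : r = 0 := by injection hm with h; omega
      subst this
      unfold loopA; simp
    · rw [if_neg hb] at hm; exact absurd hm (by simp)
  · by_cases hb : b = 0
    · exfalso
      unfold minNum at hm
      rw [dif_pos (Or.inr hb)] at hm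
      rw [if_neg (by omega)] at hm
      exact absurd hm (by simp)
    · unfold minNum at hm
      rw [dif_neg (by simp [ha, hb])] at hm
      cases hrest : minNum (a / 10) (b / 10) with
      | none => rw [hrest] at hm; exact absurd hm (by simp)
      | some rest =>
        rw [hrest] at hm
        have hr : r = min (a % 10) (b % 10) + 10 * rest := by injection hm with h; omega
        have ih := loopA_minNum (a / 10) (b / 10) rest hrest (pos + 1)
        unfold loopA
        rw [dif_neg ha]
        show loopA (a / 10) (b / 10) (pos + 1)
            (if a % 10 > b % 10 then res + ((b % 10 : Nat) : Int) * 10 ^ pos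
             else res + ((a % 10 : Nat) : Int) * 10 ^ pos)
            = res + (r : Int) * 10 ^ pos
        rw [ih]
        subst hr
        rcases Nat.lt_or_ge (b % 10) (a % 10) with hgt | hle
        · rw [if_pos hgt, Nat.min_def, if_neg (by omega)]
          push_cast
          ring
        · rw [if_neg (by omega), Nat.min_def, if_pos (by omega)]
          push_cast
          ring
termination_by a
decreasing_by exact Nat.div_lt_self (Nat.pos_of_ne_zero ha) (by omega)

-- ===== VERDICT (by name: the statement is the Claim_ definition above) =====
theorem intercambiar_spec : Claim_equal_intercambiar := by
  intro p1 p2 _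
  unfold Spec_intercambiar intercambiar intercambiar_alt
  by_cases hneg : p1 < 0 ∨ p2 < 0
  · rw [if_pos (Or.inl hneg), if_pos hneg]
  · rw [if_neg hneg]
    have h1 : 0 ≤ p1 := by omega
    have h2 : 0 ≤ p2 := by omega
    have e1 : p1.natAbs = p1.toNat := by omega
    have e2 : p2.natAbs = p2.toNat := by omega
    have hiff := minNum_isSome_iff p1.toNat p2.toNat
    unfold contarDigitos
    rw [e1, e2]
    by_cases hcd : cdGo p1.toNat ≠ cdGo p2.toNat
    · rw [if_pos (Or.inr hcd)]
      cases hm : minNum p1.toNat p2.toNat with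
      | none => rfl
      | some rv => exact absurd (hiff.mp (by rw [hm]; rfl)) hcd
    · rw [if_neg (by simp [hcd]; omega)]
      have hs : (minNum p1.toNat p2.toNat).isSome = true := hiff.mpr (by omega)
      cases hm : minNum p1.toNat p2.toNat with
      | none => rw [hm] at hs; exact absurd hs (by simp)
      | some rv =>
        rw [loopA_minNum p1.toNat p2.toNat rv hm 0 0]
        simp
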